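-- pv_equiv track=rewrite | github.com/Chiamie/Chiamie_Python | code_leveling.py | get_product_of_squares_of_each_element_of
-- ===== SOURCE A (Python) =====
-- from functools import reduce
--
-- def get_squares_of(number):
-- 	return number ** 2
--
-- def get_product_of(number, number1):
-- 	number *= number1
-- 	return number
--
-- def get_product_of_squares_of_each_element_of(list_of_numbers):
-- 	if not isinstance(list_of_numbers, list):
-- 		raise TypeError("list_of_numbers must be a list")
-- 	if all(type(item) != int for item in list_of_numbers):
-- 			raise ValueError("list_of_numbers must all be integers")
-- 	for items in list_of_numbers:
-- 		if items < 0: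
-- 			raise ValueError("list_of_numbers must all be positive integers")
-- 	if list_of_numbers == []:
-- 		raise ValueError("number_list cannot be empty")
--
-- 	squared_element_of_list = list(map(get_squares_of, list_of_numbers))
-- 	product_of_all_elements_of_list = reduce(get_product_of, squared_element_of_list)
-- 	return product_of_all_elements_of_list
-- ===== SOURCE B (Python) =====
-- def get_product_of_squares_of_each_element_of(list_of_numbers):
--     if not isinstance(list_of_numbers, list):
--         raise TypeError("list_of_numbers must be a list")
--     if all(type(item) != int for item in list_of_numbers):
--         raise ValueError("list_of_numbers must all be integers")
--     for items in list_of_numbers: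
--         if items < 0:
--             raise ValueError("list_of_numbers must all be positive integers")
--     if list_of_numbers == []:
--         raise ValueError("number_list cannot be empty")
--     product = 1
--     for n in list_of_numbers:
--         product *= n
--     return product * product
-- ===== Notes on version B (the rewrite author's own statement) =====
-- stated objective: alternative
-- what changed: Instead of squaring each element and reducing the squares, B keeps a single running product of the raw elements and squares it once at the end, using (prod x_i)^2 = prod x_i^2.
import Mathlib
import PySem

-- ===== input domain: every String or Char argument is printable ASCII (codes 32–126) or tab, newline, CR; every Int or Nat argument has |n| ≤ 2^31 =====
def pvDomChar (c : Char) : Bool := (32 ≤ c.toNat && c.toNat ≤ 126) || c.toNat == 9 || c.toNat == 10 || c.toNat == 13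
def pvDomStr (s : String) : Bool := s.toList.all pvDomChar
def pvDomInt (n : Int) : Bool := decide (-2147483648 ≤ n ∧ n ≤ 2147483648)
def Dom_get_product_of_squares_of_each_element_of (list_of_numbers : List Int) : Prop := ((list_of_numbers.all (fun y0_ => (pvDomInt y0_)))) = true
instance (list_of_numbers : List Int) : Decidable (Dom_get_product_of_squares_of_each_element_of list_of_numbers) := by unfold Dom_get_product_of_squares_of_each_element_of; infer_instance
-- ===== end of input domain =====

-- B keeps a running product of the raw elements and squares it once at the end
-- (instead of mapping each element to its square and reducing); same validation and exceptions.


-- ===== PORT A =====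
-- map each element to its square, then reduce the squares by multiplication
def get_product_of_squares_of_each_element_of (list_of_numbers : List Int) : Int :=
  let squared_element_of_list := list_of_numbers.map (fun number => number ^ 2)
  match squared_element_of_list with
  | [] => 0          -- unreachable under Pre_ (Python raises on [])
  | x :: xs => xs.foldl (fun number number1 => number * number1) x

-- ===== PORT B =====
-- running product of the raw elements, squared once at the end
def get_product_of_squares_of_each_element_of_alt (list_of_numbers : List Int) : Int :=
  let product := list_of_numbers.foldl (fun product n => product * n) 1
  product * product

-- ===== PRECONDITION & SPEC =====
-- A raises ValueError on the empty list and on any negative element; exactly those are excluded.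
def Pre_get_product_of_squares_of_each_element_of (list_of_numbers : List Int) : Prop :=
  list_of_numbers ≠ [] ∧ ∀ x ∈ list_of_numbers, 0 ≤ x
instance (list_of_numbers : List Int) : Decidable (Pre_get_product_of_squares_of_each_element_of list_of_numbers) := by unfold Pre_get_product_of_squares_of_each_element_of; infer_instance
def pvWitness_get_product_of_squares_of_each_element_of : List Int := [2, 3]

def Spec_get_product_of_squares_of_each_element_of (list_of_numbers : List Int) (out : Int) : Prop := out = get_product_of_squares_of_each_element_of_alt list_of_numbers
instance (list_of_numbers : List Int) (out : Int) : Decidable (Spec_get_product_of_squares_of_each_element_of list_of_numbers out) := by unfold Spec_get_product_of_squares_of_each_element_of; infer_instance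

-- ===== CLAIM (what is proved, stated in full; the proofs are below) =====
def Claim_equal_get_product_of_squares_of_each_element_of : Prop := ∀ (list_of_numbers : List Int), Dom_get_product_of_squares_of_each_element_of list_of_numbers → Pre_get_product_of_squares_of_each_element_of list_of_numbers → Spec_get_product_of_squares_of_each_element_of list_of_numbers (get_product_of_squares_of_each_element_of list_of_numbers)

-- ===== LEMMAS AND PROOFS =====
theorem pv_foldl_mul (xs : List Int) (a : Int) :
    xs.foldl (fun p n => p * n) a = a * xs.foldl (fun p n => p * n) 1 := by
  induction xs generalizing a with
  | nil => simp
  | cons x xs ih =>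
    simp only [List.foldl_cons]
    rw [ih (a * x), ih (1 * x)]
    ring

theorem pv_foldl_sq (xs : List Int) :
    (xs.map (fun n => n ^ 2)).foldl (fun p n => p * n) 1
      = (xs.foldl (fun p n => p * n) 1) * (xs.foldl (fun p n => p * n) 1) := by
  induction xs with
  | nil => simp
  | cons x xs ih =>
    simp only [List.map_cons, List.foldl_cons]
    rw [pv_foldl_mul (xs.map (fun n => n ^ 2)), ih, pv_foldl_mul xs (1 * x)]
    ring

-- ===== VERDICT (by name: the statement is the Claim_ definition above) =====
theorem get_product_of_squares_of_each_element_of_spec : Claim_equal_get_product_of_squares_of_each_element_of := by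
  intro l _ hpre
  unfold Spec_get_product_of_squares_of_each_element_of
  unfold get_product_of_squares_of_each_element_of get_product_of_squares_of_each_element_of_alt
  obtain ⟨hne, -⟩ := hpre
  cases l with
  | nil => exact absurd rfl hne
  | cons x xs =>
    simp only [List.map_cons, List.foldl_cons]
    rw [pv_foldl_mul (xs.map (fun n => n ^ 2)), pv_foldl_sq, pv_foldl_mul xs (1 * x)]
    ring
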